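-- pv_equiv track=rewrite | github.com/Itay1007/InformationSecurityCourse | ex-crypto/q1.py | plaintext_score
-- ===== SOURCE A (Python) =====
-- def plaintext_score(plaintext: str) -> float:
--     """Scores a candidate plaintext string, higher means more likely."""
--     score = 0
--
--     for c in plaintext:
--         #check for alpha
--         if ord('A') <= ord(c) and ord(c) <= ord('Z'):
--             score += 1
--         if ord('a') <= ord(c) and ord(c) <= ord('z'):
--             score += 2
--
--         # check whitespaces
--         if c == ' ' or c == '   ' or c == '\n' or c == '\r' or c == '\t':
--             score += 1
--         # check special characters
--         if c == '.' or c == '?' or c =='!' or c == ',' or c == ';' or c == ':':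
--             score += 1
--         # check parantesis
--         if c == '(' or c == ')' or c == '{' or c == '}' or c == '[' or c == ']':
--             score += 1
--         # check digit
--         if ord('0') <= ord('c') and ord('c') <= ord('9'):
--             score += 1
--
--     return score
-- ===== SOURCE B (Python) =====
-- UPPER = 'ABCDEFGHIJKLMNOPQRSTUVWXYZ'
-- LOWER = 'abcdefghijklmnopqrstuvwxyz'
-- OTHER = ' \n\r\t.?!,;:(){}[]'
--
--
-- def plaintext_score(plaintext: str) -> float:
--     """Scores a candidate plaintext string, higher means more likely."""
--     counts = {}
--     for c in plaintext:
--         counts[c] = counts.get(c, 0) + 1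
--     score = 0
--     for ch in UPPER:
--         score += counts.get(ch, 0)
--     for ch in LOWER:
--         score += 2 * counts.get(ch, 0)
--     for ch in OTHER:
--         score += counts.get(ch, 0)
--     return score
-- ===== Notes on version B (the rewrite author's own statement) =====
-- stated objective: alternative
-- what changed: B builds a character frequency table in one pass and then sums count*weight over fixed category tables (uppercase, lowercase, whitespace+punctuation+brackets), instead of A's per-character chain of category ifs; A's two unreachable branches (the three-space comparison and the digit test whose both operands are constants) are dropped.
import Mathlib
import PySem

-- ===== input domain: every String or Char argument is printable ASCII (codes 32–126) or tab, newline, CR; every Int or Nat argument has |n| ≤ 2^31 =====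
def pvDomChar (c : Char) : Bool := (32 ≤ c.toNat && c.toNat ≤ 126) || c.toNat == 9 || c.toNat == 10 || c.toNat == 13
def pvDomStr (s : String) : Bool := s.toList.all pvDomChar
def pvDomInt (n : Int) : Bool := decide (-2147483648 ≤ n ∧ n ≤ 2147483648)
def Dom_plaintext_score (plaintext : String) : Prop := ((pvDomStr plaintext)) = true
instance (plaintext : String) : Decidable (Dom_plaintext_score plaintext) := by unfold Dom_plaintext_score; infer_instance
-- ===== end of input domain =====

-- B replaces A's per-character chain of category ifs by one frequency-counting pass plus
-- weighted lookups over fixed category tables (objective: alternative / idiomatic).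

-- ===== PORT A =====
-- Note: Python's `c == '   '` compares a 1-char string with a 3-char string (always False, so the
-- disjunct contributes nothing and is omitted); the digit branch tests ord of the LITERAL 'c'
-- (`ord('0') <= ord('c') and ord('c') <= ord('9')`, always False) and is ported verbatim.
def plaintext_score (plaintext : String) : Int :=
  plaintext.toList.foldl
    (fun score c =>
      let score := if 'A'.toNat ≤ c.toNat ∧ c.toNat ≤ 'Z'.toNat then score + 1 else score
      let score := if 'a'.toNat ≤ c.toNat ∧ c.toNat ≤ 'z'.toNat then score + 2 else score
      let score := if c = ' ' ∨ c = '\n' ∨ c = '\r' ∨ c = '\t' then score + 1 else score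
      let score := if c = '.' ∨ c = '?' ∨ c = '!' ∨ c = ',' ∨ c = ';' ∨ c = ':' then score + 1 else score
      let score := if c = '(' ∨ c = ')' ∨ c = '{' ∨ c = '}' ∨ c = '[' ∨ c = ']' then score + 1 else score
      let score := if '0'.toNat ≤ 'c'.toNat ∧ 'c'.toNat ≤ '9'.toNat then score + 1 else score
      score)
    0

-- ===== PORT B =====
def pvUPPER : String := "ABCDEFGHIJKLMNOPQRSTUVWXYZ"
def pvLOWER : String := "abcdefghijklmnopqrstuvwxyz"
def pvOTHER : String := " \n\r\t.?!,;:(){}[]"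

def plaintext_score_alt (plaintext : String) : Int :=
  let counts : PySem.Dict Char Int :=
    plaintext.toList.foldl (fun d c => d.insert c (d.getD c 0 + 1)) PySem.Dict.empty
  let score : Int := 0
  let score := pvUPPER.toList.foldl (fun s ch => s + counts.getD ch 0) score
  let score := pvLOWER.toList.foldl (fun s ch => s + 2 * counts.getD ch 0) score
  let score := pvOTHER.toList.foldl (fun s ch => s + counts.getD ch 0) score
  score

-- ===== PRECONDITION & SPEC =====
def Spec_plaintext_score (plaintext : String) (out : Int) : Prop := out = plaintext_score_alt plaintext
instance (plaintext : String) (out : Int) : Decidable (Spec_plaintext_score plaintext out) := by unfold Spec_plaintext_score; infer_instance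

-- ===== CLAIM (what is proved, stated in full; the proofs are below) =====
def Claim_equal_plaintext_score : Prop := ∀ (plaintext : String), Dom_plaintext_score plaintext → Spec_plaintext_score plaintext (plaintext_score plaintext)

-- ===== LEMMAS AND PROOFS =====

-- the weight A's chained ifs add for one character (conditions kept verbatim; the two always-False
-- branches of A contribute 0 and are dropped here, which pv_A_eq_sum proves sound)
def pvW (c : Char) : Int :=
  (if 'A'.toNat ≤ c.toNat ∧ c.toNat ≤ 'Z'.toNat then 1 else 0)
  + (if 'a'.toNat ≤ c.toNat ∧ c.toNat ≤ 'z'.toNat then 2 else 0)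
  + (if c = ' ' ∨ c = '\n' ∨ c = '\r' ∨ c = '\t' then 1 else 0)
  + (if c = '.' ∨ c = '?' ∨ c = '!' ∨ c = ',' ∨ c = ';' ∨ c = ':' then 1 else 0)
  + (if c = '(' ∨ c = ')' ∨ c = '{' ∨ c = '}' ∨ c = '[' ∨ c = ']' then 1 else 0)

lemma pv_char_eq_iff (c d : Char) : c = d ↔ c.toNat = d.toNat :=
  ⟨fun h => h ▸ rfl, fun h => Char.ext (UInt32.toNat_inj.mp h)⟩

lemma pv_A_eq_sum (p : String) : plaintext_score p = (p.toList.map pvW).sum := by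
  unfold plaintext_score
  have hf : (fun (score : Int) (c : Char) =>
      let score := if 'A'.toNat ≤ c.toNat ∧ c.toNat ≤ 'Z'.toNat then score + 1 else score
      let score := if 'a'.toNat ≤ c.toNat ∧ c.toNat ≤ 'z'.toNat then score + 2 else score
      let score := if c = ' ' ∨ c = '\n' ∨ c = '\r' ∨ c = '\t' then score + 1 else score
      let score := if c = '.' ∨ c = '?' ∨ c = '!' ∨ c = ',' ∨ c = ';' ∨ c = ':' then score + 1 else score
      let score := if c = '(' ∨ c = ')' ∨ c = '{' ∨ c = '}' ∨ c = '[' ∨ c = ']' then score + 1 else score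
      let score := if '0'.toNat ≤ 'c'.toNat ∧ 'c'.toNat ≤ '9'.toNat then score + 1 else score
      score) = fun score c => score + pvW c := by
    funext s c
    simp only [pvW, Char.reduceToNat]
    split_ifs <;> omega
  rw [hf, PySem.List.foldl_add, zero_add]

lemma pv_mem_upper (c : Char) : c ∈ pvUPPER.toList ↔ ('A'.toNat ≤ c.toNat ∧ c.toNat ≤ 'Z'.toNat) := by
  rw [show pvUPPER.toList = ['A','B','C','D','E','F','G','H','I','J','K','L','M','N','O','P','Q','R','S','T','U','V','W','X','Y','Z'] from rfl]
  simp only [List.mem_cons, List.not_mem_nil, or_false, pv_char_eq_iff]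
  simp
  omega

lemma pv_mem_lower (c : Char) : c ∈ pvLOWER.toList ↔ ('a'.toNat ≤ c.toNat ∧ c.toNat ≤ 'z'.toNat) := by
  rw [show pvLOWER.toList = ['a','b','c','d','e','f','g','h','i','j','k','l','m','n','o','p','q','r','s','t','u','v','w','x','y','z'] from rfl]
  simp only [List.mem_cons, List.not_mem_nil, or_false, pv_char_eq_iff]
  simp
  omega

lemma pv_mem_other (c : Char) : c ∈ pvOTHER.toList ↔
    ((c = ' ' ∨ c = '\n' ∨ c = '\r' ∨ c = '\t')
     ∨ (c = '.' ∨ c = '?' ∨ c = '!' ∨ c = ',' ∨ c = ';' ∨ c = ':')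
     ∨ (c = '(' ∨ c = ')' ∨ c = '{' ∨ c = '}' ∨ c = '[' ∨ c = ']')) := by
  rw [show pvOTHER.toList = [' ','\n','\r','\t','.','?','!',',',';',':','(',')','{','}','[',']'] from rfl]
  simp only [List.mem_cons, List.not_mem_nil, or_false]
  tauto

-- one character's total contribution to B's three category sums equals A's per-character weight
lemma pv_w_split (c : Char) :
    (if c ∈ pvUPPER.toList then (1 : Int) else 0)
    + (if c ∈ pvLOWER.toList then (2 : Int) else 0)
    + (if c ∈ pvOTHER.toList then (1 : Int) else 0) = pvW c := by
  rw [if_congr (pv_mem_upper c) rfl rfl, if_congr (pv_mem_lower c) rfl rfl,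
      if_congr (pv_mem_other c) rfl rfl]
  simp only [pvW, pv_char_eq_iff]
  simp only [Char.reduceToNat]
  split_ifs <;> omega

-- prepending one character to the counted list raises a nodup category sum by its weight iff it is in the category
lemma pv_sum_count_cons (K : List Char) (hK : K.Nodup) (m : Int) (c : Char) (rest : List Char) :
    (K.map (fun ch => m * (List.count ch (c :: rest) : Int))).sum
      = (K.map (fun ch => m * (List.count ch rest : Int))).sum + (if c ∈ K then m else 0) := by
  induction K with
  | nil => simp
  | cons k K ih =>
    obtain ⟨hk, hK'⟩ := List.nodup_cons.mp hK
    rw [List.map_cons, List.map_cons, List.sum_cons, List.sum_cons, ih hK']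
    by_cases h : c = k
    · subst h
      rw [if_neg hk, if_pos (List.mem_cons_self)]
      have hcount : List.count c (c :: rest) = List.count c rest + 1 := by simp
      rw [hcount]; push_cast; ring
    · have hcount : List.count k (c :: rest) = List.count k rest := by
        simp [h]
      rw [hcount]
      by_cases hm : c ∈ K
      · rw [if_pos hm, if_pos (List.mem_cons.mpr (Or.inr hm))]; ring
      · rw [if_neg hm, if_neg (fun hmem => (List.mem_cons.mp hmem).elim h hm)]; ring

-- B's three category sums over the counter of l add up to A's per-character sum over l
lemma pv_main (l : List Char) :
    (pvUPPER.toList.map (fun ch => (1 : Int) * (List.count ch l : Int))).sum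
    + (pvLOWER.toList.map (fun ch => (2 : Int) * (List.count ch l : Int))).sum
    + (pvOTHER.toList.map (fun ch => (1 : Int) * (List.count ch l : Int))).sum
      = (l.map pvW).sum := by
  induction l with
  | nil => simp
  | cons c rest ih =>
    rw [pv_sum_count_cons _ (by decide) _ c rest,
        pv_sum_count_cons _ (by decide) _ c rest,
        pv_sum_count_cons _ (by decide) _ c rest]
    rw [List.map_cons, List.sum_cons, ← pv_w_split c, ← ih]
    ring

lemma pv_B_eq_sum (p : String) : plaintext_score_alt p = (p.toList.map pvW).sum := by
  unfold plaintext_score_alt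
  simp only [PySem.Dict.foldl_insert_getD_add_one_eq_counter, PySem.List.foldl_add,
    PySem.Dict.getD_counter, zero_add]
  rw [← pv_main p.toList]
  simp only [one_mul]

-- ===== VERDICT (by name: the statement is the Claim_ definition above) =====
theorem plaintext_score_spec : Claim_equal_plaintext_score := by
  intro p _
  unfold Spec_plaintext_score
  rw [pv_A_eq_sum, pv_B_eq_sum]
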